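-- pv_equiv track=rewrite | github.com/emorysalaun/DSP439Final | Exam.py | find_kmers
-- ===== SOURCE A (Python) =====
-- def find_kmers(sequence, k):
--
--     """
--     Identify all substrings (k-mers) of size k in the given sequence and map each to a set of its immediate subsequent substrings.
--
--     Keyword arguments:
--     sequence -- the DNA sequence to analyze
--     k -- the length of the k-mers to find
--     """
--
--     # Creates a dictionary to store Kmer subsequent substrings, the key is the original kmer
--     kmers = {}
--     # Goes all the way to the end of the sequence - the length of the substrings.
--     for i in range(len(sequence) - k):
--         # Selects the current Kmer from the sequence.
--         current_kmer = sequence[i:i+k]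
--         # Identifies the Kmer after the sequence
--         next_kmer = sequence[i+1:i+1+k]
--         if current_kmer not in kmers:
--             # If the Current_Kmer has not been seen before, add a set to the dict
--             kmers[current_kmer] = set()
--         # Fill the set with the subsequent substring.
--         kmers[current_kmer].add(next_kmer)
--     # Returns the dictionary of kmers and their substrings.
--     return kmers
-- ===== SOURCE B (Python) =====
-- def find_kmers(sequence, k):
--     """
--     Identify all substrings (k-mers) of size k in the given sequence and map each
--     to a set of its immediate subsequent substrings.
--
--     Group-by strategy: first collect every window, then for each DISTINCT window
--     (in first-occurrence order) scan all positions once, gathering the successors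
--     of that window into its set.
--     """
--     n = len(sequence) - k
--     windows = [sequence[i:i + k] for i in range(n)]
--     kmers = {}
--     for cur in dict.fromkeys(windows):
--         kmers[cur] = {sequence[j + 1:j + 1 + k] for j in range(n) if windows[j] == cur}
--     return kmers
-- ===== Notes on version B (the rewrite author's own statement) =====
-- stated objective: alternative
-- what changed: B replaces A's single incremental pass (dict grown and mutated at every index) by a staged group-by: it materialises all windows, deduplicates them to get the distinct k-mers in first-occurrence order, and for each distinct k-mer runs a separate scan over all positions collecting its successors into a set built at once.
import Mathlib
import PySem

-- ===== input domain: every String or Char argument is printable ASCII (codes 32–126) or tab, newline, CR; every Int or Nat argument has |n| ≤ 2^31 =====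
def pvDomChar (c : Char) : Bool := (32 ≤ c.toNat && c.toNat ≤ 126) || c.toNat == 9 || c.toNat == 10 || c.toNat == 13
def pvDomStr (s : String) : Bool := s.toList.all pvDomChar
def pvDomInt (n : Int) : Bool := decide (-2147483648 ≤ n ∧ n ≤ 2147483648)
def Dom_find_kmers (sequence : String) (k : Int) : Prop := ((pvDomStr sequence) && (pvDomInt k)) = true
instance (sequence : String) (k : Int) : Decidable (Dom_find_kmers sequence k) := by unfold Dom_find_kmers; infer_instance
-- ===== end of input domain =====

-- B replaces A's single incremental pass (dict grown and mutated at every index) by a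
-- staged group-by: collect all windows, deduplicate them to the distinct k-mers in
-- first-occurrence order, and for each distinct k-mer scan all positions collecting its
-- successors into a set built at once. Same return value; an alternative decomposition.

-- ===== PORT A =====
def find_kmers (sequence : String) (k : Int) : List (String × List String) :=
  let cs := sequence.toList
  let d := (PySem.List.pyRange 0 ((cs.length : Int) - k) 1).foldl
    (fun (kmers : PySem.Dict String (PySem.Set String)) i =>
      let current_kmer := String.ofList (PySem.List.slice cs (some i) (some (i + k)))
      let next_kmer := String.ofList (PySem.List.slice cs (some (i + 1)) (some (i + 1 + k)))
      let kmers := if kmers.contains current_kmer then kmers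
                   else kmers.insert current_kmer PySem.Set.empty
      kmers.modify current_kmer PySem.Set.empty (fun s => PySem.Set.add s next_kmer))
    PySem.Dict.empty
  d.items

-- ===== PORT B =====
def find_kmers_alt (sequence : String) (k : Int) : List (String × List String) :=
  let cs := sequence.toList
  let n : Int := (cs.length : Int) - k
  let windows := (PySem.List.pyRange 0 n 1).map
    (fun i => String.ofList (PySem.List.slice cs (some i) (some (i + k))))
  let d := (PySem.List.dedup windows).foldl
    (fun (kmers : PySem.Dict String (PySem.Set String)) cur =>
      kmers.insert cur
        ((PySem.List.pyRange 0 n 1).foldl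
          (fun (s : PySem.Set String) j =>
            if PySem.List.pyGetD windows j "" == cur
            then PySem.Set.add s (String.ofList (PySem.List.slice cs (some (j + 1)) (some (j + 1 + k))))
            else s)
          PySem.Set.empty))
    PySem.Dict.empty
  d.items

-- ===== PRECONDITION & SPEC =====
def Spec_find_kmers (sequence : String) (k : Int) (out : List (String × List String)) : Prop := out = find_kmers_alt sequence k
instance (sequence : String) (k : Int) (out : List (String × List String)) : Decidable (Spec_find_kmers sequence k out) := by unfold Spec_find_kmers; infer_instance

-- ===== CLAIM (what is proved, stated in full; the proofs are below) =====
def Claim_equal_find_kmers : Prop := ∀ (sequence : String) (k : Int), Dom_find_kmers sequence k → Spec_find_kmers sequence k (find_kmers sequence k)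

-- ===== LEMMAS AND PROOFS =====

-- A's loop body, abstracted over key and value
def pvStepA (d : PySem.Dict String (PySem.Set String)) (c x : String) : PySem.Dict String (PySem.Set String) :=
  (if d.contains c then d else d.insert c PySem.Set.empty).modify c PySem.Set.empty
    (fun s => PySem.Set.add s x)

theorem pv_stepA_keys (d : PySem.Dict String (PySem.Set String)) (c x : String) :
    (pvStepA d c x).keys = PySem.Set.add d.keys c := by
  unfold pvStepA
  by_cases h : d.contains c
  · rw [if_pos h, PySem.Dict.keys_modify, PySem.Dict.keys_insert_of_contains _ _ h]
    have hm : c ∈ d.keys := (PySem.Dict.contains_iff_mem_keys d c).mp h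
    simp [PySem.Set.add, hm]
  · rw [if_neg h, PySem.Dict.keys_modify,
      PySem.Dict.keys_insert_of_contains _ _ (PySem.Dict.contains_insert_self d c _),
      PySem.Dict.keys_insert_of_not_contains _ _ (by simpa using h)]
    have hm : c ∉ d.keys := fun hmem => h ((PySem.Dict.contains_iff_mem_keys d c).mpr hmem)
    simp [PySem.Set.add, hm]

theorem pv_stepA_getD (d : PySem.Dict String (PySem.Set String)) (c x c' : String) :
    (pvStepA d c x).getD c' PySem.Set.empty =
      if c' = c then PySem.Set.add (d.getD c PySem.Set.empty) x
      else d.getD c' PySem.Set.empty := by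
  unfold pvStepA
  by_cases h : d.contains c
  · rw [if_pos h, PySem.Dict.getD_modify]
  · rw [if_neg h, PySem.Dict.getD_modify]
    by_cases hc : c' = c
    · subst hc
      rw [PySem.Dict.getD_insert_self, PySem.Dict.getD_of_not_contains d _ (by simpa using h)]
    · simp [hc, PySem.Dict.getD_insert]

theorem pv_Afold_keys {α : Type} (l : List α) (g h : α → String)
    (d : PySem.Dict String (PySem.Set String)) :
    (l.foldl (fun d a => pvStepA d (g a) (h a)) d).keys
      = (l.map g).foldl PySem.Set.add d.keys := by
  induction l generalizing d with
  | nil => rfl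
  | cons a l ih => simp [List.foldl_cons, ih, pv_stepA_keys]

theorem pv_Afold_getD {α : Type} (l : List α) (g h : α → String)
    (d : PySem.Dict String (PySem.Set String)) (c : String) :
    (l.foldl (fun d a => pvStepA d (g a) (h a)) d).getD c PySem.Set.empty
      = ((l.filter (fun a => g a == c)).map h).foldl PySem.Set.add (d.getD c PySem.Set.empty) := by
  induction l generalizing d with
  | nil => rfl
  | cons a l ih =>
    rw [List.foldl_cons, ih, List.filter_cons]
    by_cases hc : g a = c
    · subst hc
      rw [pv_stepA_getD]
      simp
    · have hb : (g a == c) = false := by simpa using hc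
      rw [pv_stepA_getD]
      simp [hb, Ne.symm hc]

-- a conditional-accumulate fold is a fold over the filtered, mapped list
theorem pv_filter_fold {α β σ : Type} (l : List α) (q : α → Bool) (g : α → β)
    (f : σ → β → σ) (init : σ) :
    l.foldl (fun s a => if q a then f s (g a) else s) init
      = ((l.filter q).map g).foldl f init := by
  induction l generalizing init with
  | nil => rfl
  | cons a l ih =>
    by_cases hq : q a <;> simp [hq, ih]

theorem pv_items_eq (n : Int) (f g : Int → String) :
    ((PySem.List.pyRange 0 n 1).foldl (fun d i => pvStepA d (f i) (g i)) PySem.Dict.empty).items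
      = ((PySem.List.dedup ((PySem.List.pyRange 0 n 1).map f)).foldl
          (fun d cur => d.insert cur
            ((PySem.List.pyRange 0 n 1).foldl
              (fun s j => if PySem.List.pyGetD ((PySem.List.pyRange 0 n 1).map f) j "" == cur
                then PySem.Set.add s (g j) else s)
              PySem.Set.empty))
          PySem.Dict.empty).items := by
  by_cases hn : n ≤ 0
  · rw [PySem.List.pyRange_one_eq_nil hn]
    rfl
  · have h1 : n = (n.toNat : Int) := by omega
    set m : Nat := n.toNat with hm
    rw [h1, PySem.List.pyRange_zero_natCast]
    simp only [List.foldl_map, List.map_map, Function.comp_def]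
    have hkeys : ((List.range m).foldl
        (fun d (j : Nat) => pvStepA d (f (j : Int)) (g (j : Int))) PySem.Dict.empty).keys
        = PySem.Set.ofList ((List.range m).map (fun (j : Nat) => f (j : Int))) := by
      rw [pv_Afold_keys, PySem.Dict.keys_empty, PySem.Set.ofList_eq_foldl]
    have hnd : ((List.range m).foldl
        (fun d (j : Nat) => pvStepA d (f (j : Int)) (g (j : Int))) PySem.Dict.empty).keys.Nodup := by
      rw [hkeys]; exact PySem.Set.nodup_ofList _
    rw [PySem.Dict.items_eq_map_keys _ hnd PySem.Set.empty, hkeys,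
      PySem.List.dedup_eq_ofList,
      PySem.Dict.items_foldl_insert_fresh _ (fun c => c) _ _
        (fun a _ => PySem.Dict.contains_empty a)
        (by simp),
      show (PySem.Dict.empty : PySem.Dict String (PySem.Set String)).items = [] from rfl,
      List.nil_append]
    apply List.map_congr_left
    intro c _
    rw [pv_Afold_getD, PySem.Dict.getD_empty]
    have hcong : (List.range m).foldl
        (fun s (j : Nat) =>
          if PySem.List.pyGetD ((List.range m).map (fun (i : Nat) => f (i : Int))) (j : Int) "" == c
          then PySem.Set.add s (g (j : Int)) else s) PySem.Set.empty
        = (List.range m).foldl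
            (fun s (j : Nat) => if f (j : Int) == c then PySem.Set.add s (g (j : Int)) else s)
            PySem.Set.empty := by
      apply PySem.List.foldl_congr_mem
      intro acc j hj
      rw [PySem.List.pyGetD_natCast, PySem.List.getD_map_range _ _ _ _ (List.mem_range.mp hj)]
    rw [hcong, pv_filter_fold (List.range m) (fun (j : Nat) => f (j : Int) == c)
      (fun (j : Nat) => g (j : Int)) PySem.Set.add PySem.Set.empty]

theorem pv_main (sequence : String) (k : Int) :
    find_kmers sequence k = find_kmers_alt sequence k := by
  exact pv_items_eq ((sequence.toList.length : Int) - k)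
    (fun i => String.ofList (PySem.List.slice sequence.toList (some i) (some (i + k))))
    (fun i => String.ofList (PySem.List.slice sequence.toList (some (i + 1)) (some (i + 1 + k))))

-- ===== VERDICT (by name: the statement is the Claim_ definition above) =====
theorem find_kmers_spec : Claim_equal_find_kmers := by
  intro sequence k _
  exact pv_main sequence k
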